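-- pv_equiv track=rewrite | github.com/ChanYenFen/layout-optimization | src/geometry/correction_legacy.py | detect_core_spans
-- ===== SOURCE A (Python) =====
-- def detect_core_spans(indices, n, max_gap=2):
--     """
--     Merge modified indices into core spans.
--     Small gaps inside a span are filled.
--
--     Returns
--     -------
--     spans : list[list[int]]
--         Each span is a contiguous index list.
--     """
--     if not indices:
--         return []
--
--     idx = sorted(set(i % n for i in indices))
--     spans = [[idx[0]]]
--
--     for cur in idx[1:]:
--         last = spans[-1][-1]
--         gap = cur - last - 1
--
--         if gap <= max_gap:
--             spans[-1].extend(range(last + 1, cur + 1))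
--         else:
--             spans.append([cur])
--
--     return spans
-- ===== SOURCE B (Python) =====
-- def detect_core_spans(indices, n, max_gap=2):
--     """Merge modified indices into core spans, filling gaps <= max_gap.
--
--     Staged computation with no scanning state: from the adjacent pairs
--     of the sorted distinct residues, the elements preceded by a big gap
--     are the span starts and the elements followed by a big gap are the
--     span ends; zipping starts with ends yields the spans directly.
--     """
--     if not indices:
--         return []
--
--     idx = sorted(set(i % n for i in indices))
--     pairs = list(zip(idx, idx[1:]))
--     starts = [idx[0]] + [b for a, b in pairs if b - a - 1 > max_gap]
--     ends = [a for a, b in pairs if b - a - 1 > max_gap] + [idx[-1]]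
--     return [list(range(s, e + 1)) for s, e in zip(starts, ends)]
-- ===== Notes on version B (the rewrite author's own statement) =====
-- stated objective: alternative
-- what changed: A runs one stateful scan that grows spans[-1] in place; B keeps no scan state at all: it pairs each sorted residue with its successor, reads off span starts (elements after a big gap) and span ends (elements before a big gap) as two filters, and zips them into full ranges.
import Mathlib
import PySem

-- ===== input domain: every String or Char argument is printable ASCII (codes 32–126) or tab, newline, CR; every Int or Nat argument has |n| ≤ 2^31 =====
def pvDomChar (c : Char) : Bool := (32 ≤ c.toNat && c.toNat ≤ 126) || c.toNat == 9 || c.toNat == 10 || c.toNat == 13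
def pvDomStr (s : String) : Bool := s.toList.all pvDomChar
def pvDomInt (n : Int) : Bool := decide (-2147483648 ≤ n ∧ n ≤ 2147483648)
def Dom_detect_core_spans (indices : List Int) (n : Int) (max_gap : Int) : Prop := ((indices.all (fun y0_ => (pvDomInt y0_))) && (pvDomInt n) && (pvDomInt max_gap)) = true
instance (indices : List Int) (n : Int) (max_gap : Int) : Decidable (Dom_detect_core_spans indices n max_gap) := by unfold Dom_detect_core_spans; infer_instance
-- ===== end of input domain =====

-- B replaces A's stateful scan (growing spans[-1] in place) by stateless staged passes:
-- span starts and span ends are read off the adjacent-pair list by two filters and zipped (objective: alternative).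

-- ===== PORT A =====
-- one loop step of A: spans is kept as (done, lastSpan) with spans = done ++ [lastSpan]
-- (lastSpan is never empty, so spans[-1][-1] is pyGetD lastSpan (-1) 0, exact here)
def pvA_step (max_gap : Int) (st : List (List Int) × List Int) (cur : Int) : List (List Int) × List Int :=
  let last := PySem.List.pyGetD st.2 (-1) 0
  let gap := cur - last - 1
  if gap ≤ max_gap then (st.1, st.2 ++ PySem.List.pyRange (last + 1) (cur + 1) 1)
  else (st.1 ++ [st.2], [cur])

def detect_core_spans (indices : List Int) (n : Int) (max_gap : Int) : List (List Int) :=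
  if indices = [] then []
  else
    let idx := PySem.List.sorted (PySem.Set.ofList (indices.map (fun i => PySem.Int.mod i n))) (fun x => x) false
    match idx with
    | [] => []  -- unreachable: indices ≠ [] makes idx nonempty
    | h :: t =>
      let st := t.foldl (pvA_step max_gap) ([], [h])
      st.1 ++ [st.2]

-- ===== PORT B =====
def detect_core_spans_alt (indices : List Int) (n : Int) (max_gap : Int) : List (List Int) :=
  if indices = [] then []
  else
    let idx := PySem.List.sorted (PySem.Set.ofList (indices.map (fun i => PySem.Int.mod i n))) (fun x => x) false
    let pairs := idx.zip (PySem.List.slice idx (some 1) none)          -- zip(idx, idx[1:])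
    let big := pairs.filter (fun p => decide (p.2 - p.1 - 1 > max_gap))
    let starts := PySem.List.pyGetD idx 0 0 :: big.map (fun p => p.2)  -- [idx[0]] + [b for (a,b) in big]
    let ends := big.map (fun p => p.1) ++ [PySem.List.pyGetD idx (-1) 0]  -- [a for (a,b) in big] + [idx[-1]]
    (starts.zip ends).map (fun p => PySem.List.pyRange p.1 (p.2 + 1) 1)

-- ===== PRECONDITION & SPEC =====
-- Pre_ excludes only the inputs on which Python A raises ZeroDivisionError (i % 0 with nonempty indices).
def Pre_detect_core_spans (indices : List Int) (n : Int) (max_gap : Int) : Prop :=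
  indices = [] ∨ n ≠ 0
instance (indices : List Int) (n : Int) (max_gap : Int) : Decidable (Pre_detect_core_spans indices n max_gap) := by unfold Pre_detect_core_spans; infer_instance

def pvWitness_detect_core_spans : List Int × Int × Int := ([3, 1, 9, 4], 12, 2)

def Spec_detect_core_spans (indices : List Int) (n : Int) (max_gap : Int) (out : List (List Int)) : Prop := out = detect_core_spans_alt indices n max_gap
instance (indices : List Int) (n : Int) (max_gap : Int) (out : List (List Int)) : Decidable (Spec_detect_core_spans indices n max_gap out) := by unfold Spec_detect_core_spans; infer_instance

-- ===== CLAIM (what is proved, stated in full; the proofs are below) =====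
def Claim_equal_detect_core_spans : Prop := ∀ (indices : List Int) (n : Int) (max_gap : Int), Dom_detect_core_spans indices n max_gap → Pre_detect_core_spans indices n max_gap → Spec_detect_core_spans indices n max_gap (detect_core_spans indices n max_gap)

-- ===== LEMMAS AND PROOFS =====

-- the adjacent pairs of the list prev :: t
def pvPairsAux : Int → List Int → List (Int × Int)
  | _, [] => []
  | prev, c :: r => (prev, c) :: pvPairsAux c r

-- the elements of t preceded by a big gap (span starts after the first)
def pvGapStarts (mg : Int) : Int → List Int → List Int
  | _, [] => []
  | prev, c :: r => if c - prev - 1 > mg then c :: pvGapStarts mg c r else pvGapStarts mg c r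

-- the elements of prev :: t followed by a big gap, plus the last element (span ends)
def pvGapEnds (mg : Int) : Int → List Int → List Int
  | prev, [] => [prev]
  | prev, c :: r => if c - prev - 1 > mg then prev :: pvGapEnds mg c r else pvGapEnds mg c r

lemma zip_tail_eq_pairsAux : ∀ (t : List Int) (h : Int), (h :: t).zip t = pvPairsAux h t
  | [], _ => rfl
  | c :: r, h => by simp [pvPairsAux, zip_tail_eq_pairsAux r c]

lemma starts_eq (mg : Int) : ∀ (t : List Int) (h : Int),
    ((pvPairsAux h t).filter (fun p => decide (p.2 - p.1 - 1 > mg))).map (fun p => p.2)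
      = pvGapStarts mg h t
  | [], _ => rfl
  | c :: r, h => by
    simp only [pvPairsAux, pvGapStarts, List.filter_cons]
    by_cases hg : c - h - 1 > mg <;> simp [hg, starts_eq mg r c]

lemma ends_eq (mg : Int) : ∀ (t : List Int) (h : Int),
    ((pvPairsAux h t).filter (fun p => decide (p.2 - p.1 - 1 > mg))).map (fun p => p.1)
      ++ [(h :: t).getLast (List.cons_ne_nil h t)]
      = pvGapEnds mg h t
  | [], _ => rfl
  | c :: r, h => by
    simp only [pvPairsAux, pvGapEnds, List.filter_cons]
    have hl : (h :: c :: r).getLast (List.cons_ne_nil h (c :: r))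
        = (c :: r).getLast (List.cons_ne_nil c r) := by
      simp [List.getLast]
    by_cases hg : c - h - 1 > mg <;> simp [hg, hl, ends_eq mg r c]

-- the last element of a nonempty contiguous range, read as Python's [-1]
lemma pyGetD_range_last (a b : Int) (h : a ≤ b) :
    PySem.List.pyGetD (PySem.List.pyRange a (b + 1) 1) (-1) 0 = b := by
  rw [PySem.List.pyRange_one_succ_right h]
  simp [PySem.List.pyGetD, PySem.List.pyGet?_neg_one]

-- loop invariant: A's fold produces exactly the spans described by the start/end lists
lemma loopA_eq (mg : Int) : ∀ (t : List Int) (done : List (List Int)) (start prev : Int),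
    start ≤ prev → t.Pairwise (· < ·) → (∀ x ∈ t, prev < x) →
    (t.foldl (pvA_step mg) (done, PySem.List.pyRange start (prev + 1) 1)).1
      ++ [(t.foldl (pvA_step mg) (done, PySem.List.pyRange start (prev + 1) 1)).2]
    = done ++ ((start :: pvGapStarts mg prev t).zip (pvGapEnds mg prev t)).map
        (fun p => PySem.List.pyRange p.1 (p.2 + 1) 1)
  | [], done, start, prev => by intro _ _ _; simp [pvGapStarts, pvGapEnds]
  | cur :: rest, done, start, prev => by
    intro h1 h2 h3
    have hcur : prev < cur := h3 cur (by simp)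
    rw [List.pairwise_cons] at h2
    simp only [List.foldl_cons, pvA_step, pvGapStarts, pvGapEnds,
      pyGetD_range_last start prev h1]
    by_cases hg : cur - prev - 1 > mg
    · have hns : ¬ (cur - prev - 1 ≤ mg) := by omega
      rw [if_neg hns, if_pos hg, if_pos hg,
        ← PySem.List.pyRange_one_singleton cur]
      have := loopA_eq mg rest (done ++ [PySem.List.pyRange start (prev + 1) 1]) cur cur
        le_rfl h2.2 (fun x hx => h2.1 x hx)
      rw [this]
      simp [List.zip_cons_cons]
    · have hs : cur - prev - 1 ≤ mg := by omega
      rw [if_pos hs, if_neg hg, if_neg hg,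
        ← PySem.List.pyRange_one_append start (prev + 1) (cur + 1) (by omega) (by omega)]
      exact loopA_eq mg rest done start cur (by omega) h2.2 (fun x hx => h2.1 x hx)

-- ===== VERDICT (by name: the statement is the Claim_ definition above) =====
theorem detect_core_spans_spec : Claim_equal_detect_core_spans := by
  intro indices n mg _ _
  show detect_core_spans indices n mg = detect_core_spans_alt indices n mg
  unfold detect_core_spans detect_core_spans_alt
  by_cases hni : indices = []
  · simp [hni]
  · simp only [if_neg hni]
    cases hidx : PySem.List.sorted (PySem.Set.ofList (indices.map (fun i => PySem.Int.mod i n))) (fun x => x) false with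
    | nil =>
      exfalso
      rw [PySem.List.sorted_eq_nil_iff] at hidx
      rcases List.exists_mem_of_ne_nil indices hni with ⟨x, hx⟩
      have : PySem.Int.mod x n ∈ PySem.Set.ofList (indices.map (fun i => PySem.Int.mod i n)) := by
        rw [PySem.Set.mem_ofList]; exact List.mem_map_of_mem hx
      rw [hidx] at this; exact absurd this (List.not_mem_nil)
    | cons h t =>
      have hpw : (h :: t).Pairwise (· < ·) := by
        rw [← hidx]; exact PySem.List.sorted_ofList_pairwise_lt _
      rw [List.pairwise_cons] at hpw
      -- A's side via the loop invariant
      have hA := loopA_eq mg t [] h h le_rfl hpw.2 hpw.1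
      rw [PySem.List.pyRange_one_singleton h] at hA
      -- B's side: rewrite the staged passes into the same start/end lists
      rw [PySem.List.slice_from_one, List.tail_cons, zip_tail_eq_pairsAux t h]
      rw [show PySem.List.pyGetD (h :: t) 0 0 = h from PySem.List.pyGetD_zero_cons h t 0]
      rw [show PySem.List.pyGetD (h :: t) (-1) 0 = (h :: t).getLast (List.cons_ne_nil h t) from
        PySem.List.pyGetD_neg_one (h :: t) 0 (List.cons_ne_nil h t)]
      rw [starts_eq mg t h, ends_eq mg t h]
      simpa using hA
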